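-- pv_equiv track=rewrite | github.com/timchopard/cloudberries | backend/other/parser.py | handle_titles
-- ===== SOURCE A (Python) =====
-- def handle_titles(in_string:str):
--     title_depth = 0
--     while len(in_string) > title_depth and in_string[title_depth] == '#':
--         title_depth += 1
--     if title_depth == 0:
--         return in_string
--     in_string = f"<h{title_depth}>{in_string[title_depth:].lstrip()}"
--     return in_string + f'</h{title_depth}>'
-- ===== SOURCE B (Python) =====
-- def _peel(s, d):
--     """Recursively strip one leading '#' at a time, accumulating the depth."""
--     if s[:1] == '#':
--         return _peel(s[1:], d + 1)
--     return d, s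
--
-- def handle_titles(in_string: str):
--     depth, rest = _peel(in_string, 0)
--     if depth == 0:
--         return in_string
--     tag = f"h{depth}"
--     return f"<{tag}>{rest.lstrip()}</{tag}>"
-- ===== Notes on version B (the rewrite author's own statement) =====
-- stated objective: alternative
-- what changed: A's indexed while-loop over the original string is replaced by structural recursion (_peel) that consumes the string one leading hash character at a time, returning both the depth and the remaining suffix at once, so the result is built from the recursion's residue instead of re-slicing the input at a counted index.
import Mathlib
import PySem

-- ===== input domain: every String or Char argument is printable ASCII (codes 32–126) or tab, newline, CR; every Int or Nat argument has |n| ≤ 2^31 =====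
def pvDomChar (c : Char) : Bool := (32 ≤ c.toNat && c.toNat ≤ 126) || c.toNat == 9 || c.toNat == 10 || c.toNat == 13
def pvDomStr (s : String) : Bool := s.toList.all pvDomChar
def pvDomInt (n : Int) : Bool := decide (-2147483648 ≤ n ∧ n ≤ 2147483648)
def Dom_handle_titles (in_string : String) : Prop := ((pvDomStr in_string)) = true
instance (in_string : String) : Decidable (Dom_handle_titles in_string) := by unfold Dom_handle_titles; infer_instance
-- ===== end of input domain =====

-- B replaces A's indexed while-loop with a structural recursion that peels leading '#' one at a time, returning (depth, suffix) together; same output everywhere.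


-- ===== PORT A =====
-- the while loop 'while len(s) > td and s[td] == '#': td += 1' as structural recursion over the char list
def pvCountA : List Char → Nat
  | [] => 0
  | c :: rest => if c = '#' then pvCountA rest + 1 else 0

def handle_titles (in_string : String) : String :=
  let title_depth := pvCountA in_string.toList
  if title_depth = 0 then in_string
  else
    -- f"<h{td}>{in_string[td:].lstrip()}"
    let s2 : List Char := "<h".toList ++ (PySem.Int.toStr title_depth).toList ++ ">".toList
      ++ PySem.Chars.lstrip (PySem.List.slice in_string.toList (some (title_depth : Int)) none)
    -- + f'</h{td}>'
    String.mk (s2 ++ "</h".toList ++ (PySem.Int.toStr title_depth).toList ++ ">".toList)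

-- ===== PORT B =====
-- _peel: recursion on the string structure, accumulating the depth and returning the residue
def pvPeel : List Char → Nat → Nat × List Char
  | c :: rest, d => if c = '#' then pvPeel rest (d + 1) else (d, c :: rest)
  | [], d => (d, [])

def handle_titles_alt (in_string : String) : String :=
  let pr := pvPeel in_string.toList 0
  let depth := pr.1
  let rest := pr.2
  if depth = 0 then in_string
  else
    let tag : List Char := "h".toList ++ (PySem.Int.toStr depth).toList
    String.mk ("<".toList ++ tag ++ ">".toList ++ PySem.Chars.lstrip rest
      ++ "</".toList ++ tag ++ ">".toList)

-- ===== PRECONDITION & SPEC =====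
def Spec_handle_titles (in_string : String) (out : String) : Prop := out = handle_titles_alt in_string
instance (in_string : String) (out : String) : Decidable (Spec_handle_titles in_string out) := by unfold Spec_handle_titles; infer_instance

-- ===== CLAIM =====
def Claim_equal_handle_titles : Prop := ∀ (in_string : String), Dom_handle_titles in_string → Spec_handle_titles in_string (handle_titles in_string)

-- ===== LEMMAS AND PROOFS =====
theorem pvPeel_eq (cs : List Char) (d : Nat) :
    pvPeel cs d = (d + pvCountA cs, cs.drop (pvCountA cs)) := by
  induction cs generalizing d with
  | nil => simp [pvPeel, pvCountA]
  | cons c rest ih =>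
    by_cases h : c = '#'
    · simp [pvPeel, pvCountA, h, ih]; omega
    · simp [pvPeel, pvCountA, h]

-- ===== VERDICT =====
theorem handle_titles_spec : Claim_equal_handle_titles := by
  intro s _
  show _ = _
  unfold handle_titles handle_titles_alt
  rw [pvPeel_eq]
  simp [PySem.List.slice_from_natCast, List.append_assoc]
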